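-- pv_equiv track=rewrite | github.com/ShreyAnchalwar/coding-challenge-py | app.py | correct_words
-- ===== SOURCE A (Python) =====
-- def correct_words(dictionary, mistypes):
--     corrections = []
--     for word in mistypes:
--         for correct_word in dictionary:
--             if len(word) == len(correct_word):
--                 diff_count = sum([1 for i in range(len(word)) if word[i] != correct_word[i]])
--                 if diff_count == 1:
--                     corrections.append(correct_word)
--                     break
--     return corrections
-- ===== SOURCE B (Python) =====
-- def correct_words(dictionary, mistypes):
--     # Index dictionary words by one-hole masks (position, prefix, suffix);
--     # each mistype probes its len(w) masks and keeps the lowest-index hit.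
--     index = {}
--     for j, cw in enumerate(dictionary):
--         for i in range(len(cw)):
--             index.setdefault((i, cw[:i], cw[i + 1:]), []).append((j, cw))
--     out = []
--     for w in mistypes:
--         best = None
--         for i in range(len(w)):
--             for j, cw in index.get((i, w[:i], w[i + 1:]), ()):
--                 if cw[i] != w[i]:
--                     if best is None or j < best[0]:
--                         best = (j, cw)
--                     break
--         if best is not None:
--             out.append(best[1])
--     return out
-- ===== Notes on version B (the rewrite author's own statement) =====
-- stated objective: faster
-- what changed: B builds a hash index of dictionary words keyed by one-hole masks (position, prefix, suffix) in one pass, then each mistype probes its len(w) masks and keeps the lowest-index entry whose char at the hole differs, replacing A's full dictionary scan with character-count per mistype.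
import Mathlib
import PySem

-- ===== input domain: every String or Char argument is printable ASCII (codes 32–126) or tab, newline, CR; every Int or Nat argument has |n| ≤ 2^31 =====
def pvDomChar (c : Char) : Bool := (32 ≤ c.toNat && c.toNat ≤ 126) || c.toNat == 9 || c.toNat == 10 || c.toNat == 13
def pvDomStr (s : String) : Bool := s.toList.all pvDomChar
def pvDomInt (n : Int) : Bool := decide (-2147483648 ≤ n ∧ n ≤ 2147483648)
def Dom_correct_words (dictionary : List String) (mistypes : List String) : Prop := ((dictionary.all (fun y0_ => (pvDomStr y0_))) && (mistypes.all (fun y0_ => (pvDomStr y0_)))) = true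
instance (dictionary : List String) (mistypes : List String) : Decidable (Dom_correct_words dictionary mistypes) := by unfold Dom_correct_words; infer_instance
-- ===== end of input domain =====

-- B replaces A's per-mistype dictionary scan by a one-pass hash index of the dictionary
-- keyed by one-hole masks (position, prefix, suffix); measured faster in a timing run.

-- ===== PORT A =====
-- inner 'for correct_word in dictionary: … break' of A, returning the appended word (none = no break)
def pvFindA (word : String) : List String → Option String
  | [] => none
  | cw :: rest =>
    if PySem.Str.len word = PySem.Str.len cw then
      let diff_count := (((PySem.List.pyRange 0 (PySem.Str.len word) 1).filter
          (fun i => PySem.Str.pyGet? word i ≠ PySem.Str.pyGet? cw i)).map (fun _ => (1 : Int))).sum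
      if diff_count = 1 then some cw else pvFindA word rest
    else pvFindA word rest

def correct_words (dictionary : List String) (mistypes : List String) : List String :=
  mistypes.foldl (fun corrections word =>
    match pvFindA word dictionary with
    | some cw => corrections ++ [cw]
    | none => corrections) []

-- ===== PORT B =====
-- the key (i, cw[:i], cw[i+1:]) of Source B
def pvMask (i : Int) (cw : String) : Int × String × String :=
  (i, PySem.Str.slice cw none (some i), PySem.Str.slice cw (some (i + 1)) none)

-- Source B's index-building pass; 'setdefault(k, []).append(e)' stores getD k [] ++ [e] at k
def pvIndex (dictionary : List String) : PySem.Dict (Int × String × String) (List (Int × String)) :=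
  (PySem.List.enumerate dictionary).foldl (fun d p =>
    (PySem.List.pyRange 0 (PySem.Str.len p.2) 1).foldl (fun d i =>
      d.insert (pvMask i p.2) (d.getD (pvMask i p.2) [] ++ [p])) d)
    PySem.Dict.empty

-- Source B's bucket loop with break: first entry whose char at i differs from w's
def pvFirstDiff (w : String) (i : Int) : List (Int × String) → Option (Int × String)
  | [] => none
  | e :: rest =>
    if PySem.Str.pyGet? e.2 i ≠ PySem.Str.pyGet? w i then some e else pvFirstDiff w i rest

def correct_words_alt (dictionary : List String) (mistypes : List String) : List String :=
  let index := pvIndex dictionary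
  mistypes.foldl (fun out w =>
    let best := (PySem.List.pyRange 0 (PySem.Str.len w) 1).foldl (fun best i =>
      match pvFirstDiff w i (index.getD (pvMask i w) []) with
      | some e =>
        match best with
        | none => some e
        | some b => if e.1 < b.1 then some e else best
      | none => best) none
    match best with
    | some b => out ++ [b.2]
    | none => out) []

-- ===== PRECONDITION & SPEC =====
def Spec_correct_words (dictionary : List String) (mistypes : List String) (out : List String) : Prop := out = correct_words_alt dictionary mistypes
instance (dictionary : List String) (mistypes : List String) (out : List String) : Decidable (Spec_correct_words dictionary mistypes out) := by unfold Spec_correct_words; infer_instance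

-- ===== CLAIM (what is proved, stated in full; the proofs are below) =====
def Claim_equal_correct_words : Prop := ∀ (dictionary : List String) (mistypes : List String), Dom_correct_words dictionary mistypes → Spec_correct_words dictionary mistypes (correct_words dictionary mistypes)

-- ===== LEMMAS AND PROOFS =====

-- proof-side predicate: A's branch condition (equal length, exactly one mismatch)
def pvNear (w cw : String) : Bool :=
  w.toList.length == cw.toList.length &&
  (w.toList.zip cw.toList).countP (fun p => decide (p.1 ≠ p.2)) == 1

-- first dictionary word near w
def pvFindN (w : String) : List String → Option String
  | [] => none
  | cw :: rest => if pvNear w cw then some cw else pvFindN w rest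

-- bucket membership condition of Source B's index at key k
def pvC (k : Int × String × String) (p : Int × String) : Bool :=
  decide (0 ≤ k.1) && decide (k.1 < PySem.Str.len p.2) && decide (pvMask k.1 p.2 = k)

-- the bucket the index stores at key k
def pvBucket (k : Int × String × String) (dictionary : List String) : List (Int × String) :=
  (PySem.List.enumerate dictionary).filter (fun p => pvC k p)

-- first near entry of the enumerated dictionary
def pvHeadNear (dictionary : List String) (w : String) : Option (Int × String) :=
  ((PySem.List.enumerate dictionary).filter (fun p => pvNear w p.2)).head?


-- index-count over the string equals zip-count (equal lengths) — specific to A's branch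
theorem pv_count_eq (u v : List Char) (h : u.length = v.length) :
    (List.range u.length).countP (fun k => decide (u[k]? ≠ v[k]?)) =
    (u.zip v).countP (fun p => decide (p.1 ≠ p.2)) := by
  induction u generalizing v with
  | nil => simp
  | cons a u ih =>
    cases v with
    | nil => simp at h
    | cons b v =>
      simp only [List.length_cons, Nat.add_right_cancel_iff] at h
      rw [List.length_cons, List.range_succ_eq_map, List.countP_cons, List.countP_map,
        List.zip_cons_cons, List.countP_cons]
      have ec : ((fun k => decide ((a :: u)[k]? ≠ (b :: v)[k]?)) ∘ Nat.succ) =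
          (fun k => decide (u[k]? ≠ v[k]?)) := by
        funext k; simp
      have e0 : (decide ((a :: u)[(0 : Nat)]? ≠ (b :: v)[(0 : Nat)]?)) = decide (a ≠ b) := by
        simp
      rw [ec, ih v h, e0]

theorem pv_key (w cw : String) (hlen : w.toList.length = cw.toList.length) :
    (List.range w.toList.length).countP
        (fun (k : Nat) => decide (PySem.Str.pyGet? w ((k : Int)) ≠ PySem.Str.pyGet? cw ((k : Int)))) =
      (w.toList.zip cw.toList).countP (fun p => decide (p.1 ≠ p.2)) := by
  have hp : ∀ k ∈ List.range w.toList.length,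
      (decide (PySem.Str.pyGet? w ((k : Int)) ≠ PySem.Str.pyGet? cw ((k : Int))) = true) ↔
      (decide ((w.toList[k]?) ≠ (cw.toList[k]?)) = true) := by
    intro k _
    have e1 : PySem.Str.pyGet? w ((k : Int)) = w.toList[k]? := PySem.List.pyGet?_natCast _ _
    have e2 : PySem.Str.pyGet? cw ((k : Int)) = cw.toList[k]? := PySem.List.pyGet?_natCast _ _
    rw [e1, e2]
  rw [List.countP_congr hp, pv_count_eq w.toList cw.toList hlen]

theorem pv_sum_map_one {α : Type} (l : List α) :
    (l.map (fun _ => (1 : Int))).sum = (l.length : Int) := by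
  induction l with
  | nil => simp
  | cons x xs _ => simp; ring

-- A's branch test coincides with pvNear
theorem pv_cond_eq (w cw : String) :
    pvNear w cw = true ↔
      (PySem.Str.len w = PySem.Str.len cw ∧
        (((PySem.List.pyRange 0 (PySem.Str.len w) 1).filter
          (fun i => PySem.Str.pyGet? w i ≠ PySem.Str.pyGet? cw i)).map (fun _ => (1 : Int))).sum = 1) := by
  unfold pvNear
  simp only [Bool.and_eq_true, beq_iff_eq]
  have hL : PySem.Str.len w = ((w.toList.length : Nat) : Int) := PySem.Str.len_eq w
  have hLc : PySem.Str.len cw = ((cw.toList.length : Nat) : Int) := PySem.Str.len_eq cw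
  constructor
  · rintro ⟨h1, h2⟩
    have hl : PySem.Str.len w = PySem.Str.len cw := by rw [hL, hLc]; exact_mod_cast h1
    refine ⟨hl, ?_⟩
    rw [pv_sum_map_one, ← List.countP_eq_length_filter, hL,
      PySem.List.pyRange_zero_natCast, List.countP_map]
    simp only [Function.comp_def]
    rw [pv_key w cw h1]
    omega
  · rintro ⟨h1, h2⟩
    have hlen : w.toList.length = cw.toList.length := by
      rw [hL, hLc] at h1; exact_mod_cast h1
    refine ⟨hlen, ?_⟩
    rw [pv_sum_map_one, ← List.countP_eq_length_filter, hL,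
      PySem.List.pyRange_zero_natCast, List.countP_map] at h2
    simp only [Function.comp_def] at h2
    rw [pv_key w cw hlen] at h2
    omega

theorem pvFindA_eq_findN (w : String) (ds : List String) : pvFindA w ds = pvFindN w ds := by
  induction ds with
  | nil => rfl
  | cons cw rest ih =>
    rw [pvFindN, ← ih, pvFindA]
    by_cases h1 : PySem.Str.len w = PySem.Str.len cw
    · rw [if_pos h1]
      by_cases h2 : (((PySem.List.pyRange 0 (PySem.Str.len w) 1).filter
          (fun i => PySem.Str.pyGet? w i ≠ PySem.Str.pyGet? cw i)).map (fun _ => (1 : Int))).sum = 1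
      · have hn : pvNear w cw = true := (pv_cond_eq w cw).mpr ⟨h1, h2⟩
        rw [if_pos hn]
        show (if (((PySem.List.pyRange 0 (PySem.Str.len w) 1).filter
            (fun i => PySem.Str.pyGet? w i ≠ PySem.Str.pyGet? cw i)).map (fun _ => (1 : Int))).sum = 1
          then some cw else pvFindA w rest) = some cw
        rw [if_pos h2]
      · have hn : ¬ pvNear w cw = true := fun hh => h2 ((pv_cond_eq w cw).mp hh).2
        rw [if_neg hn]
        show (if (((PySem.List.pyRange 0 (PySem.Str.len w) 1).filter
            (fun i => PySem.Str.pyGet? w i ≠ PySem.Str.pyGet? cw i)).map (fun _ => (1 : Int))).sum = 1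
          then some cw else pvFindA w rest) = pvFindA w rest
        rw [if_neg h2]
    · have hn : ¬ pvNear w cw = true := fun hh => h1 ((pv_cond_eq w cw).mp hh).1
      rw [if_neg h1, if_neg hn]

-- A's outer loop is a filterMap
theorem pv_foldl_filterMap (mistypes : List String) (f : String → Option String) :
    ∀ acc : List String,
      mistypes.foldl (fun corrections word =>
        match f word with
        | some cw => corrections ++ [cw]
        | none => corrections) acc = acc ++ mistypes.filterMap f := by
  induction mistypes with
  | nil => intro acc; simp
  | cons w ws ih =>
    intro acc
    simp only [List.foldl_cons, List.filterMap_cons]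
    cases f w with
    | none => simp [ih]
    | some b => simp [ih]

-- one word's inner mask loop updates exactly its own len(cw) distinct keys
theorem pv_inner (p : Int × String) :
    ∀ (is : List Int), is.Nodup →
    ∀ (d : PySem.Dict (Int × String × String) (List (Int × String))) (k : Int × String × String),
    ((is.foldl (fun d i => d.insert (pvMask i p.2) (d.getD (pvMask i p.2) [] ++ [p])) d).getD k [])
      = d.getD k [] ++ (if k.1 ∈ is ∧ pvMask k.1 p.2 = k then [p] else []) := by
  intro is
  induction is with
  | nil => intro _ d k; simp
  | cons i it ih =>
    intro hnd d k
    have hni : i ∉ it := (List.nodup_cons.mp hnd).1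
    simp only [List.foldl_cons]
    rw [ih (List.nodup_cons.mp hnd).2, PySem.Dict.getD_insert]
    by_cases hk : k = pvMask i p.2
    · subst hk
      rw [if_pos rfl]
      have hc1 : ¬ ((pvMask i p.2).1 ∈ it ∧ pvMask (pvMask i p.2).1 p.2 = pvMask i p.2) := by
        intro hcon; exact hni hcon.1
      have hc2 : (pvMask i p.2).1 ∈ i :: it ∧ pvMask (pvMask i p.2).1 p.2 = pvMask i p.2 := by
        exact ⟨List.mem_cons_self, rfl⟩
      rw [if_neg hc1, if_pos hc2]
      simp
    · rw [if_neg hk]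
      congr 1
      by_cases hk1 : k.1 = i
      · have hm : pvMask k.1 p.2 ≠ k := by rw [hk1]; exact fun hq => hk hq.symm
        simp [hm]
      · simp [List.mem_cons, hk1]

-- the whole building pass: each key holds its bucket, in dictionary order
theorem pv_build :
    ∀ (l : List (Int × String)) (d : PySem.Dict (Int × String × String) (List (Int × String)))
      (k : Int × String × String),
    ((l.foldl (fun d p =>
        (PySem.List.pyRange 0 (PySem.Str.len p.2) 1).foldl (fun d i =>
          d.insert (pvMask i p.2) (d.getD (pvMask i p.2) [] ++ [p])) d) d).getD k [])
      = d.getD k [] ++ l.filter (fun p => pvC k p) := by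
  intro l
  induction l with
  | nil => intro d k; simp
  | cons p l ih =>
    intro d k
    simp only [List.foldl_cons, List.filter_cons]
    rw [ih, pv_inner p _ (PySem.List.nodup_pyRange_one 0 (PySem.Str.len p.2)) d k]
    have hcond : (k.1 ∈ PySem.List.pyRange 0 (PySem.Str.len p.2) 1 ∧ pvMask k.1 p.2 = k) ↔ pvC k p = true := by
      unfold pvC
      rw [PySem.List.mem_pyRange_one]
      simp only [Bool.and_eq_true, decide_eq_true_eq]
    by_cases hc : pvC k p = true
    · rw [if_pos (hcond.mpr hc)]
      simp [hc]
    · rw [if_neg (fun hq => hc (hcond.mp hq))]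
      simp [hc]

theorem pv_index_getD (ds : List String) (k : Int × String × String) :
    (pvIndex ds).getD k [] = pvBucket k ds := by
  unfold pvIndex pvBucket
  rw [pv_build]
  simp [PySem.Dict.getD_empty]

-- zip of a list with itself has no mismatches
theorem pv_zip_self (t : List Char) : (t.zip t).countP (fun p => decide (p.1 ≠ p.2)) = 0 := by
  induction t with
  | nil => simp
  | cons a t ih =>
    rw [List.zip_cons_cons, List.countP_cons, ih]
    simp

theorem pv_zip_zero (u : List Char) :
    ∀ v : List Char, u.length = v.length →
      (u.zip v).countP (fun p => decide (p.1 ≠ p.2)) = 0 → u = v := by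
  induction u with
  | nil => intro v h _; cases v; rfl; simp at h
  | cons a u ih =>
    intro v h hc
    cases v with
    | nil => simp at h
    | cons b v =>
      rw [List.zip_cons_cons, List.countP_cons] at hc
      have h1 : u.length = v.length := by simpa using h
      by_cases hab : a = b
      · subst hab
        simp only [ne_eq, not_true_eq_false, decide_false] at hc
        rw [ih v h1 hc]
      · simp [hab] at hc

-- lists agreeing off position n: the mismatch count is the one comparison at n
theorem pv_count_single :
    ∀ (n : Nat) (u v : List Char), n < u.length → n < v.length →
      u.take n = v.take n → u.drop (n+1) = v.drop (n+1) →
      u.length = v.length ∧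
      (u.zip v).countP (fun p => decide (p.1 ≠ p.2)) = (if u[n]? ≠ v[n]? then 1 else 0) := by
  intro n
  induction n with
  | zero =>
    intro u v hu hv _ hd
    cases u with
    | nil => simp at hu
    | cons a u' =>
      cases v with
      | nil => simp at hv
      | cons b v' =>
        simp only [List.drop_succ_cons, List.drop_zero] at hd
        subst hd
        constructor
        · simp
        · rw [List.zip_cons_cons, List.countP_cons, pv_zip_self]
          by_cases hab : a = b <;> simp [hab]
  | succ n ih =>
    intro u v hu hv ht hd
    cases u with
    | nil => simp at hu
    | cons a u' =>
      cases v with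
      | nil => simp at hv
      | cons b v' =>
        simp only [List.take_succ_cons, List.cons.injEq] at ht
        obtain ⟨hab, ht'⟩ := ht
        subst hab
        simp only [List.drop_succ_cons] at hd
        have hu' : n < u'.length := by simpa using hu
        have hv' : n < v'.length := by simpa using hv
        obtain ⟨hl, hc⟩ := ih u' v' hu' hv' ht' hd
        constructor
        · simpa using hl
        · rw [List.zip_cons_cons, List.countP_cons, hc]
          simp

-- one mismatch yields the unique differing position, with agreement off it
theorem pv_near_exists (u : List Char) :
    ∀ v : List Char, u.length = v.length →
      (u.zip v).countP (fun p => decide (p.1 ≠ p.2)) = 1 →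
      ∃ n : Nat, n < u.length ∧ n < v.length ∧ u.take n = v.take n ∧
        u.drop (n+1) = v.drop (n+1) ∧ u[n]? ≠ v[n]? := by
  induction u with
  | nil => intro v _ hc; simp at hc
  | cons a u' ih =>
    intro v h hc
    cases v with
    | nil => simp at h
    | cons b v' =>
      rw [List.zip_cons_cons, List.countP_cons] at hc
      have h1 : u'.length = v'.length := by simpa using h
      by_cases hab : a = b
      · subst hab
        simp only [ne_eq, not_true_eq_false, decide_false] at hc
        obtain ⟨n, hn1, hn2, hn3, hn4, hn5⟩ := ih v' h1 hc
        refine ⟨n + 1, by simpa using hn1, by simpa using hn2, ?_, ?_, ?_⟩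
        · simp [List.take_succ_cons, hn3]
        · simpa using hn4
        · simpa using hn5
      · have hz : (u'.zip v').countP (fun p => decide (p.1 ≠ p.2)) = 0 := by
          have hcc : (u'.zip v').countP (fun p => decide (p.1 ≠ p.2)) + 1 = 1 := by
            simpa [hab] using hc
          omega
        have huv : u' = v' := pv_zip_zero u' v' h1 hz
        subst huv
        refine ⟨0, by simp, by simp, by simp, by simp, by simp [hab]⟩

-- string equality is list equality
theorem pv_str_eq_iff (s t : String) : s = t ↔ s.toList = t.toList := by
  constructor
  · intro h; rw [h]
  · intro h; exact String.toList_inj.mp h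

-- the one-hole masks of w and cw at n agree iff w and cw agree off position n
theorem pv_mask_eq_iff (n : Nat) (w cw : String) :
    pvMask (n : Int) w = pvMask (n : Int) cw ↔
      w.toList.take n = cw.toList.take n ∧ w.toList.drop (n+1) = cw.toList.drop (n+1) := by
  unfold pvMask
  have h1 : ((n : Int) + 1) = (((n + 1 : Nat)) : Int) := by push_cast; ring
  rw [Prod.ext_iff, Prod.ext_iff]
  simp only [true_and]
  rw [pv_str_eq_iff, pv_str_eq_iff]
  simp only [PySem.Str.toList_slice, PySem.Chars.slice_eq_listSlice]
  rw [h1, PySem.List.slice_to_natCast, PySem.List.slice_to_natCast,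
    PySem.List.slice_from_natCast, PySem.List.slice_from_natCast]

theorem pv_near_of_mask (w cw : String) (n : Nat) (hw : n < w.toList.length)
    (hc : n < cw.toList.length) (hm : pvMask (n : Int) w = pvMask (n : Int) cw)
    (hd : w.toList[n]? ≠ cw.toList[n]?) : pvNear w cw = true := by
  obtain ⟨ht, hdr⟩ := (pv_mask_eq_iff n w cw).mp hm
  obtain ⟨hl, hcount⟩ := pv_count_single n w.toList cw.toList hw hc ht hdr
  unfold pvNear
  simp only [Bool.and_eq_true, beq_iff_eq]
  exact ⟨hl, by rw [hcount]; simp [hd]⟩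

theorem pv_mask_of_near (w cw : String) (h : pvNear w cw = true) :
    ∃ n : Nat, n < w.toList.length ∧ n < cw.toList.length ∧
      pvMask (n : Int) w = pvMask (n : Int) cw ∧ w.toList[n]? ≠ cw.toList[n]? := by
  unfold pvNear at h
  simp only [Bool.and_eq_true, beq_iff_eq] at h
  obtain ⟨n, h1, h2, h3, h4, h5⟩ := pv_near_exists w.toList cw.toList h.1 h.2
  exact ⟨n, h1, h2, (pv_mask_eq_iff n w cw).mpr ⟨h3, h4⟩, h5⟩

theorem pv_fd_mem (w : String) (i : Int) :
    ∀ (l : List (Int × String)) (e : Int × String), pvFirstDiff w i l = some e →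
      e ∈ l ∧ PySem.Str.pyGet? e.2 i ≠ PySem.Str.pyGet? w i := by
  intro l
  induction l with
  | nil => intro e he; simp [pvFirstDiff] at he
  | cons x xs ih =>
    intro e he
    rw [pvFirstDiff] at he
    by_cases hx : PySem.Str.pyGet? x.2 i ≠ PySem.Str.pyGet? w i
    · rw [if_pos hx] at he
      cases he
      exact ⟨List.mem_cons_self, hx⟩
    · rw [if_neg hx] at he
      obtain ⟨h1, h2⟩ := ih e he
      exact ⟨List.mem_cons_of_mem x h1, h2⟩

theorem pv_fd_first (w : String) (i : Int) :
    ∀ (l : List (Int × String)), l.Pairwise (fun a b => a.1 < b.1) →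
      ∀ h ∈ l, PySem.Str.pyGet? h.2 i ≠ PySem.Str.pyGet? w i →
        ∃ e, pvFirstDiff w i l = some e ∧ e.1 ≤ h.1 := by
  intro l
  induction l with
  | nil => intro _ h hh; simp at hh
  | cons x xs ih =>
    intro hp h hh hd
    rw [pvFirstDiff]
    by_cases hx : PySem.Str.pyGet? x.2 i ≠ PySem.Str.pyGet? w i
    · refine ⟨x, by rw [if_pos hx], ?_⟩
      rcases List.mem_cons.mp hh with he | ht
      · rw [he]
      · exact le_of_lt ((List.pairwise_cons.mp hp).1 h ht)
    · rw [if_neg hx]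
      have hht : h ∈ xs := by
        rcases List.mem_cons.mp hh with he | ht
        · exact absurd (he ▸ hd) hx
        · exact ht
      exact ih (List.pairwise_cons.mp hp).2 h hht hd

-- generic first-by-index minimum fold
theorem pv_foldMin (g : Int → Option (Int × String)) (h : Int × String) :
    ∀ (is : List Int) (b : Option (Int × String)),
      (∀ i ∈ is, ∀ e, g i = some e → h.1 ≤ e.1 ∧ (h.1 = e.1 → e = h)) →
      (b = some h ∨ ((∀ c, b = some c → h.1 < c.1) ∧ ∃ i ∈ is, g i = some h)) →
      is.foldl (fun best i =>
        match g i with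
        | some e =>
          match best with
          | none => some e
          | some b => if e.1 < b.1 then some e else best
        | none => best) b = some h := by
  intro is
  induction is with
  | nil =>
    intro b hall hb
    rcases hb with hb | ⟨_, i, hi, _⟩
    · exact hb
    · simp at hi
  | cons i it ih =>
    intro b hall hb
    simp only [List.foldl_cons]
    refine ih _ (fun j hj => hall j (List.mem_cons_of_mem i hj)) ?_
    cases hgi : g i with
    | none =>
      rcases hb with hb | ⟨hc, i0, hi0, hg0⟩
      · left; rw [hb]
      · right
        refine ⟨hc, i0, ?_, hg0⟩
        rcases List.mem_cons.mp hi0 with he | ht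
        · exfalso; rw [he, hgi] at hg0; cases hg0
        · exact ht
    | some e =>
      have he := hall i List.mem_cons_self e hgi
      by_cases heh : e = h
      · subst heh
        rcases hb with hb | ⟨hc, _⟩
        · subst hb
          left
          show (if e.1 < e.1 then some e else some e) = some e
          simp
        · cases b with
          | none => left; rfl
          | some c =>
            have hlt := hc c rfl
            left
            show (if e.1 < c.1 then some e else some c) = some e
            rw [if_pos hlt]
      · have hlt : h.1 < e.1 := lt_of_le_of_ne he.1 (fun q => heh (he.2 q))
        rcases hb with hb | ⟨hc, i0, hi0, hg0⟩
        · subst hb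
          left
          show (if e.1 < h.1 then some e else some h) = some h
          rw [if_neg (by omega)]
        · have hi0' : i0 ∈ it := by
            rcases List.mem_cons.mp hi0 with hq | hq
            · exfalso; rw [hq, hgi] at hg0
              exact heh (Option.some.inj hg0)
            · exact hq
          right
          refine ⟨?_, i0, hi0', hg0⟩
          intro c hbc
          cases b with
          | none =>
            have hec := Option.some.inj (show some e = some c from hbc)
            rw [← hec]
            exact hlt
          | some c0 =>
            have hbc' : (if e.1 < c0.1 then some e else some c0) = some c := hbc
            have hc0 := hc c0 rfl
            by_cases hq : e.1 < c0.1
            · rw [if_pos hq] at hbc'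
              have hec := Option.some.inj hbc'
              rw [← hec]
              exact hlt
            · rw [if_neg hq] at hbc'
              have hec := Option.some.inj hbc'
              rw [← hec]
              exact hc0

theorem pv_foldNone (g : Int → Option (Int × String)) :
    ∀ is : List Int, (∀ i ∈ is, g i = none) →
      is.foldl (fun best i =>
        match g i with
        | some e =>
          match best with
          | none => some e
          | some b => if e.1 < b.1 then some e else best
        | none => best) none = none := by
  intro is
  induction is with
  | nil => intro _; rfl
  | cons i it ih =>
    intro hall
    simp only [List.foldl_cons]
    rw [hall i List.mem_cons_self]
    exact ih (fun j hj => hall j (List.mem_cons_of_mem i hj))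

-- B's per-mistype probe loop finds the first near dictionary entry
theorem pv_lookup (ds : List String) (w : String) :
    (PySem.List.pyRange 0 (PySem.Str.len w) 1).foldl (fun best i =>
      match pvFirstDiff w i ((pvIndex ds).getD (pvMask i w) []) with
      | some e =>
        match best with
        | none => some e
        | some b => if e.1 < b.1 then some e else best
      | none => best) none = pvHeadNear ds w := by
  set g : Int → Option (Int × String) :=
    fun i => pvFirstDiff w i ((pvIndex ds).getD (pvMask i w) []) with hg
  have hup : ∀ i ∈ PySem.List.pyRange 0 (PySem.Str.len w) 1, ∀ e, g i = some e →
      e ∈ (PySem.List.enumerate ds).filter (fun p => pvNear w p.2) := by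
    intro i hi e hge
    rw [hg] at hge
    simp only at hge
    rw [pv_index_getD] at hge
    obtain ⟨hmem, hdiff⟩ := pv_fd_mem w i _ e hge
    unfold pvBucket at hmem
    rw [List.mem_filter] at hmem
    obtain ⟨hen, hC⟩ := hmem
    have hC' := hC
    unfold pvC at hC'
    simp only [Bool.and_eq_true, decide_eq_true_eq] at hC'
    obtain ⟨⟨hge0, hlt⟩, hmeq⟩ := hC'
    obtain ⟨hi0, hiw⟩ := (PySem.List.mem_pyRange_one).mp hi
    set n : Nat := i.toNat with hn
    have hin : i = (n : Int) := by omega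
    have hwlen : n < w.toList.length := by
      have := PySem.Str.len_eq w
      omega
    have helen : n < e.2.toList.length := by
      have := PySem.Str.len_eq e.2
      simp only [pvMask] at hlt
      omega
    have hmask : pvMask (n : Int) w = pvMask (n : Int) e.2 := by
      rw [← hin]
      exact (show pvMask i e.2 = pvMask i w from hmeq).symm
    have hdn : w.toList[n]? ≠ e.2.toList[n]? := by
      intro hq
      apply hdiff
      rw [hin] at *
      rw [PySem.Str.pyGet?_natCast, PySem.Str.pyGet?_natCast]
      exact hq.symm
    have hnear := pv_near_of_mask w e.2 n hwlen helen hmask hdn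
    rw [List.mem_filter]
    exact ⟨hen, hnear⟩
  unfold pvHeadNear
  cases hH : ((PySem.List.enumerate ds).filter (fun p => pvNear w p.2)).head? with
  | none =>
    have hemp : (PySem.List.enumerate ds).filter (fun p => pvNear w p.2) = [] := by
      cases hq : (PySem.List.enumerate ds).filter (fun p => pvNear w p.2) with
      | nil => rfl
      | cons x xs => rw [hq] at hH; simp at hH
    apply pv_foldNone
    intro i hi
    cases hgi : pvFirstDiff w i ((pvIndex ds).getD (pvMask i w) []) with
    | none => rfl
    | some e =>
      exfalso
      have := hup i hi e hgi
      rw [hemp] at this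
      simp at this
  | some h =>
    have hpw : ((PySem.List.enumerate ds).filter (fun p => pvNear w p.2)).Pairwise
        (fun a b => a.1 < b.1) :=
      List.Pairwise.sublist List.filter_sublist (PySem.List.pairwise_lt_enumerate ds 0)
    have hmemh : h ∈ (PySem.List.enumerate ds).filter (fun p => pvNear w p.2) := by
      cases hq : (PySem.List.enumerate ds).filter (fun p => pvNear w p.2) with
      | nil => rw [hq] at hH; simp at hH
      | cons x xs =>
        rw [hq] at hH
        simp only [List.head?_cons, Option.some.injEq] at hH
        rw [← hH]
        exact List.mem_cons_self
    have hhead : ∀ e ∈ (PySem.List.enumerate ds).filter (fun p => pvNear w p.2),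
        h.1 ≤ e.1 ∧ (h.1 = e.1 → e = h) := by
      intro e hme
      cases hq : (PySem.List.enumerate ds).filter (fun p => pvNear w p.2) with
      | nil => rw [hq] at hme; simp at hme
      | cons x xs =>
        rw [hq] at hH hme hpw
        simp only [List.head?_cons, Option.some.injEq] at hH
        subst hH
        rcases List.mem_cons.mp hme with he | ht
        · subst he; exact ⟨le_refl _, fun _ => rfl⟩
        · have := (List.pairwise_cons.mp hpw).1 e ht
          exact ⟨le_of_lt this, fun hq2 => absurd hq2 (by omega)⟩
    have hall : ∀ i ∈ PySem.List.pyRange 0 (PySem.Str.len w) 1, ∀ e, g i = some e →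
        h.1 ≤ e.1 ∧ (h.1 = e.1 → e = h) := by
      intro i hi e hge
      exact hhead e (hup i hi e hge)
    -- exhibit the probe that returns h
    have hnearh : pvNear w h.2 = true := by
      rw [List.mem_filter] at hmemh
      exact hmemh.2
    have henh : h ∈ PySem.List.enumerate ds := (List.mem_filter.mp hmemh).1
    obtain ⟨n, hn1, hn2, hn3, hn4⟩ := pv_mask_of_near w h.2 hnearh
    have hiw : ((n : Int)) ∈ PySem.List.pyRange 0 (PySem.Str.len w) 1 := by
      rw [PySem.List.mem_pyRange_one]
      have := PySem.Str.len_eq w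
      omega
    have hbh : h ∈ pvBucket (pvMask (n : Int) w) ds := by
      unfold pvBucket
      rw [List.mem_filter]
      refine ⟨henh, ?_⟩
      unfold pvC
      simp only [Bool.and_eq_true, decide_eq_true_eq]
      refine ⟨⟨by simp [pvMask], ?_⟩, ?_⟩
      · show ((n : Int)) < PySem.Str.len h.2
        have := PySem.Str.len_eq h.2
        omega
      · show pvMask ((n : Int)) h.2 = pvMask ((n : Int)) w
        exact hn3.symm
    have hpwB : (pvBucket (pvMask (n : Int) w) ds).Pairwise (fun a b => a.1 < b.1) := by
      unfold pvBucket
      exact List.Pairwise.sublist List.filter_sublist (PySem.List.pairwise_lt_enumerate ds 0)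
    have hdh : PySem.Str.pyGet? h.2 ((n : Int)) ≠ PySem.Str.pyGet? w ((n : Int)) := by
      rw [PySem.Str.pyGet?_natCast, PySem.Str.pyGet?_natCast]
      exact fun hq => hn4 hq.symm
    obtain ⟨e, hfd, hle⟩ := pv_fd_first w ((n : Int)) _ hpwB h hbh hdh
    have hge : g ((n : Int)) = some e := by
      rw [hg]
      simp only
      rw [pv_index_getD]
      exact hfd
    have heN := hup _ hiw e hge
    have := hhead e heN
    have heq : e = h := this.2 (by omega)
    subst heq
    refine pv_foldMin g e _ none hall (Or.inr ⟨?_, ?_⟩)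
    · intro c hc
      exact nomatch hc
    · exact ⟨((n : Int)), hiw, hge⟩

-- A's first-match as head of the filtered enumeration
theorem pv_findN_head (w : String) :
    ∀ (ds : List String) (s : Int),
      pvFindN w ds =
        (((PySem.List.enumerate ds s).filter (fun p => pvNear w p.2)).head?).map (fun p => p.2) := by
  intro ds
  induction ds with
  | nil => intro s; simp [pvFindN, PySem.List.enumerate_nil]
  | cons cw r ih =>
    intro s
    rw [PySem.List.enumerate_cons]
    simp only [List.filter_cons]
    by_cases hn : pvNear w cw = true
    · simp [pvFindN, hn]
    · rw [pvFindN]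
      simp only [hn]
      rw [if_neg (by simp), ih (s + 1)]
      simp

-- B's outer loop is a filterMap of the per-mistype result
theorem pv_foldl_opt (f : String → Option (Int × String)) :
    ∀ (ms : List String) (acc : List String),
      ms.foldl (fun out w =>
        match f w with
        | some b => out ++ [b.2]
        | none => out) acc = acc ++ ms.filterMap (fun w => (f w).map (fun p => p.2)) := by
  intro ms
  induction ms with
  | nil => intro acc; simp
  | cons w ws ih =>
    intro acc
    simp only [List.foldl_cons, List.filterMap_cons]
    cases f w with
    | none => simp [ih]
    | some b => simp [ih]

-- ===== VERDICT (by name: the statement is the Claim_ definition above) =====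
theorem correct_words_spec : Claim_equal_correct_words := by
  intro ds ms _
  unfold Spec_correct_words correct_words correct_words_alt
  rw [pv_foldl_filterMap ms (fun word => pvFindA word ds) []]
  rw [pv_foldl_opt (fun w =>
    (PySem.List.pyRange 0 (PySem.Str.len w) 1).foldl (fun best i =>
      match pvFirstDiff w i ((pvIndex ds).getD (pvMask i w) []) with
      | some e =>
        match best with
        | none => some e
        | some b => if e.1 < b.1 then some e else best
      | none => best) none) ms []]
  simp only [List.nil_append]
  apply List.filterMap_congr
  intro w _
  rw [pvFindA_eq_findN, pv_findN_head w ds 0, pv_lookup ds w]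
  rfl
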